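-- pv_equiv track=rewrite | github.com/UW-COSMOS/Cosmos | cosmos/ingestion/ingest/process/detection/src/evaluate/evaluate.py | calculate_statistics_map
-- ===== SOURCE A (Python) =====
-- def calculate_statistics_map(fp_list):
--     statistics = {
--         'background': 0,
--         'localization': 0,
--         'similar': 0,
--         'other': 0
--     }
--     stats_map = {'all': statistics.copy()}
--     for fp in fp_list:
--         p, fp_type = fp
--         p_cls, p_bb, p_score = p
--         if p_cls not in stats_map:
--             stats_map[p_cls] = statistics.copy()
--         stats_map['all'][fp_type] += 1
--         stats_map[p_cls][fp_type] += 1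
--     return stats_map
-- ===== SOURCE B (Python) =====
-- def calculate_statistics_map(fp_list):
--     # Pass 1: bucket the fp_types per class; the 'all' bucket receives every fp_type.
--     groups = {'all': []}
--     for (p_cls, p_bb, p_score), fp_type in fp_list:
--         groups['all'].append(fp_type)
--         groups.setdefault(p_cls, []).append(fp_type)
--     # Pass 2: count each bucket against a fresh zeroed template.
--     stats_map = {}
--     for cls, types in groups.items():
--         stats = dict.fromkeys(('background', 'localization', 'similar', 'other'), 0)
--         for t in types:
--             stats[t] += 1  # KeyError on an unknown fp_type, like the original
--         stats_map[cls] = stats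
--     return stats_map
-- ===== Notes on version B (the rewrite author's own statement) =====
-- stated objective: alternative
-- what changed: A updates nested per-class dicts in one interleaved pass; B first buckets the fp_types per class (with an 'all' bucket) in one pass and then counts each bucket against a fresh zeroed template in a second pass.
-- outside the precondition, e.g. on calculate_statistics_map([(('figure', [1], 2), 'bogus')]): A raises KeyError, B raises KeyError
import Mathlib
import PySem

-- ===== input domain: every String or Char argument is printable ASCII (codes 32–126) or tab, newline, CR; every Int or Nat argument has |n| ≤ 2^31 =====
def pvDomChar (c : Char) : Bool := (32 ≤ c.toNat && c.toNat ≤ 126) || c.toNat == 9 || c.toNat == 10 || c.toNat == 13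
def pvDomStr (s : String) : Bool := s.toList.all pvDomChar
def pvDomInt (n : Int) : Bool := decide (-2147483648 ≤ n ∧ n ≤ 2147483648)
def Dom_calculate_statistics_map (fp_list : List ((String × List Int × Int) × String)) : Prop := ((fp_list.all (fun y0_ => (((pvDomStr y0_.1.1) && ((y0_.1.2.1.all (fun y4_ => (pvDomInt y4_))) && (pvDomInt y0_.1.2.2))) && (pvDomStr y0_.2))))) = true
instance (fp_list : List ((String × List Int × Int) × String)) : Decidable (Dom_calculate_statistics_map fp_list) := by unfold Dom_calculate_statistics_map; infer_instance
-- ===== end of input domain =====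

-- B replaces A's single pass over nested dicts by a group-then-count decomposition: one pass
-- bucketing fp_types per class (plus an 'all' bucket), then counting each bucket against a
-- fresh zeroed template (objective: alternative decomposition, same cost).

-- ===== PORT A =====
-- the zeroed statistics template (Python's `statistics` dict; each `.copy()` is this value)
def pvStats : PySem.Dict String Int :=
  PySem.Dict.ofList [("background", 0), ("localization", 0), ("similar", 0), ("other", 0)]

def calculate_statistics_map (fp_list : List ((String × List Int × Int) × String)) : List (String × List (String × Int)) :=
  let init : PySem.Dict String (PySem.Dict String Int) := PySem.Dict.ofList [("all", pvStats)]
  let final := fp_list.foldl (fun sm fp =>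
    let p_cls := fp.1.1
    let fp_type := fp.2
    -- if p_cls not in stats_map: stats_map[p_cls] = statistics.copy()
    let sm1 := if sm.contains p_cls then sm else sm.insert p_cls pvStats
    -- stats_map['all'][fp_type] += 1   (inner default never used inside Pre_: fp_type is a template key)
    let sm2 := sm1.modify "all" PySem.Dict.empty (fun d => d.modify fp_type 0 (· + 1))
    -- stats_map[p_cls][fp_type] += 1
    sm2.modify p_cls PySem.Dict.empty (fun d => d.modify fp_type 0 (· + 1))) init
  final.items.map (fun p => (p.1, p.2.items))

-- ===== PORT B =====
-- _count(types): fresh zeroed template, then one increment per fp_type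
def pvCount (types : List String) : PySem.Dict String Int :=
  types.foldl (fun d t => d.modify t 0 (· + 1)) pvStats

def calculate_statistics_map_alt (fp_list : List ((String × List Int × Int) × String)) : List (String × List (String × Int)) :=
  -- pass 1: bucket fp_types per class; the 'all' bucket receives every fp_type
  let groups : PySem.Dict String (List String) := PySem.Dict.ofList [("all", [])]
  let groups := fp_list.foldl (fun g fp =>
    let g1 := g.modify "all" [] (· ++ [fp.2])
    (g1.setdefault fp.1.1 []).modify fp.1.1 [] (· ++ [fp.2])) groups
  -- pass 2: {cls: _count(types) for cls, types in groups.items()}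
  groups.items.map (fun p => (p.1, (pvCount p.2).items))

-- ===== PRECONDITION & SPEC =====
-- Pre_ excludes exactly the inputs on which the Python A raises KeyError: an fp_type outside
-- the four template keys (B raises the same KeyError there).
def Pre_calculate_statistics_map (fp_list : List ((String × List Int × Int) × String)) : Prop :=
  (fp_list.all (fun fp => ["background", "localization", "similar", "other"].contains fp.2)) = true
instance (fp_list : List ((String × List Int × Int) × String)) : Decidable (Pre_calculate_statistics_map fp_list) := by unfold Pre_calculate_statistics_map; infer_instance

def pvWitness_calculate_statistics_map : (List ((String × List Int × Int) × String)) :=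
  [(("figure", [1, 2], 3), "background"), (("table", [], 0), "similar"), (("figure", [4], 1), "background")]

def Spec_calculate_statistics_map (fp_list : List ((String × List Int × Int) × String)) (out : List (String × List (String × Int))) : Prop := out = calculate_statistics_map_alt fp_list
instance (fp_list : List ((String × List Int × Int) × String)) (out : List (String × List (String × Int))) : Decidable (Spec_calculate_statistics_map fp_list out) := by unfold Spec_calculate_statistics_map; infer_instance

-- ===== CLAIM (what is proved, stated in full; the proofs are below) =====
def Claim_equal_calculate_statistics_map : Prop := ∀ (fp_list : List ((String × List Int × Int) × String)), Dom_calculate_statistics_map fp_list → Pre_calculate_statistics_map fp_list → Spec_calculate_statistics_map fp_list (calculate_statistics_map fp_list)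

-- ===== LEMMAS AND PROOFS =====

-- A's loop state, reconstructed from B's buckets: count every bucket
def pvMapCount (g : PySem.Dict String (List String)) : PySem.Dict String (PySem.Dict String Int) :=
  PySem.Dict.mk (g.items.map (fun p => (p.1, pvCount p.2)))

theorem pvCount_append (v : List String) (t : String) :
    pvCount (v ++ [t]) = (pvCount v).modify t 0 (· + 1) := by
  simp [pvCount]

theorem contains_pvMapCount (g : PySem.Dict String (List String)) (k : String) :
    (pvMapCount g).contains k = g.contains k := by
  simp [pvMapCount, PySem.Dict.contains, List.any_map, Function.comp_def]

theorem getD_pvMapCount (g : PySem.Dict String (List String)) (k : String)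
    (h : g.contains k = true) :
    (pvMapCount g).getD k PySem.Dict.empty = pvCount (g.getD k []) := by
  simp only [PySem.Dict.getD, PySem.Dict.get?, pvMapCount]
  rw [List.find?_map]
  simp only [PySem.Dict.contains, List.any_eq_true] at h
  obtain ⟨p, hp, hpk⟩ := h
  have hfind : (g.items.find? (fun p => p.1 == k)).isSome :=
    List.find?_isSome.mpr ⟨p, hp, hpk⟩
  obtain ⟨q, hq⟩ := Option.isSome_iff_exists.mp hfind
  simp [Function.comp_def, hq]

theorem insert_pvMapCount (g : PySem.Dict String (List String)) (k : String) (v : List String) :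
    (pvMapCount g).insert k (pvCount v) = pvMapCount (g.insert k v) := by
  apply PySem.Dict.ext
  simp only [PySem.Dict.insert, contains_pvMapCount]
  by_cases h : g.contains k = true
  · simp only [h, if_pos]
    simp only [pvMapCount, List.map_map]
    apply List.map_congr_left
    intro p _
    by_cases hk : p.1 = k <;> simp [hk]
  · simp only [eq_false_of_ne_true h, Bool.false_eq_true, if_false]
    simp [pvMapCount]

theorem modify_pvMapCount (g : PySem.Dict String (List String)) (k t : String)
    (h : g.contains k = true) :
    (pvMapCount g).modify k PySem.Dict.empty (fun d => d.modify t 0 (· + 1))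
      = pvMapCount (g.modify k [] (· ++ [t])) := by
  calc (pvMapCount g).modify k PySem.Dict.empty (fun d => d.modify t 0 (· + 1))
      = (pvMapCount g).insert k (((pvMapCount g).getD k PySem.Dict.empty).modify t 0 (· + 1)) := rfl
    _ = (pvMapCount g).insert k (pvCount (g.getD k [] ++ [t])) := by
        rw [getD_pvMapCount g k h, pvCount_append]
    _ = pvMapCount (g.insert k (g.getD k [] ++ [t])) := insert_pvMapCount g k _
    _ = pvMapCount (g.modify k [] (· ++ [t])) := rfl

theorem contains_modify' (g : PySem.Dict String (List String)) (k k' : String)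
    (f : List String → List String) (h : g.contains k' = true) :
    (g.modify k [] f).contains k' = true := by
  rw [PySem.Dict.contains_modify]
  simp [h]

-- the class-creation steps of the two loop bodies agree
theorem step_eq (g : PySem.Dict String (List String)) (c t : String)
    (hall : g.contains "all" = true) :
    (if g.contains c then g else g.insert c []).modify "all" [] (· ++ [t])
      = (g.modify "all" [] (· ++ [t])).setdefault c [] := by
  by_cases hc : g.contains c = true
  · rw [if_pos hc, PySem.Dict.setdefault_of_contains _ _ (contains_modify' g "all" c _ hc)]
  · have hc' : g.contains c = false := eq_false_of_ne_true hc
    have hcne : c ≠ "all" := fun he => hc (he ▸ hall)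
    rw [if_neg hc]
    have hall' : (g.insert c []).contains "all" = true := by
      rw [PySem.Dict.contains_insert]; simp [hall]
    have hcm : (g.modify "all" [] (· ++ [t])).contains c = false := by
      rw [PySem.Dict.contains_modify]; simp [hc', hcne]
    rw [PySem.Dict.setdefault_of_not_contains _ _ hcm]
    apply PySem.Dict.ext
    simp only [PySem.Dict.modify]
    rw [PySem.Dict.getD_insert_of_ne g [] [] (Ne.symm hcne)]
    have hvc : (g.insert "all" (g.getD "all" [] ++ [t])).contains c = false := by
      rw [PySem.Dict.contains_insert]; simp [hc', hcne]
    rw [PySem.Dict.items_insert_of_contains _ _ hall',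
        PySem.Dict.items_insert_of_not_contains _ _ hvc,
        PySem.Dict.items_insert_of_contains _ _ hall,
        PySem.Dict.items_insert_of_not_contains _ _ hc']
    simp [hcne]

-- contains "all" survives B's loop body
theorem contains_all_stepB (g : PySem.Dict String (List String)) (c t : String)
    (hall : g.contains "all" = true) :
    (((g.modify "all" [] (· ++ [t])).setdefault c []).modify c [] (· ++ [t])).contains "all" = true := by
  rw [PySem.Dict.contains_modify, PySem.Dict.contains_setdefault, PySem.Dict.contains_modify]
  simp [hall]

-- the two loops agree through pvMapCount
theorem loop_eq (l : List ((String × List Int × Int) × String))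
    (g : PySem.Dict String (List String)) (hall : g.contains "all" = true) :
    l.foldl (fun sm fp =>
      ((if sm.contains fp.1.1 then sm else sm.insert fp.1.1 pvStats).modify "all"
          PySem.Dict.empty (fun d => d.modify fp.2 0 (· + 1))).modify fp.1.1
          PySem.Dict.empty (fun d => d.modify fp.2 0 (· + 1))) (pvMapCount g)
      = pvMapCount (l.foldl (fun g fp =>
          ((g.modify "all" [] (· ++ [fp.2])).setdefault fp.1.1 []).modify fp.1.1 [] (· ++ [fp.2])) g) := by
  induction l generalizing g with
  | nil => rfl
  | cons fp rest ih =>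
    simp only [List.foldl_cons]
    have hstep :
        ((if (pvMapCount g).contains fp.1.1 then pvMapCount g
            else (pvMapCount g).insert fp.1.1 pvStats).modify "all"
            PySem.Dict.empty (fun d => d.modify fp.2 0 (· + 1))).modify fp.1.1
            PySem.Dict.empty (fun d => d.modify fp.2 0 (· + 1))
          = pvMapCount (((g.modify "all" [] (· ++ [fp.2])).setdefault fp.1.1 []).modify fp.1.1 [] (· ++ [fp.2])) := by
      have hiter : (if (pvMapCount g).contains fp.1.1 then pvMapCount g
            else (pvMapCount g).insert fp.1.1 pvStats)
          = pvMapCount (if g.contains fp.1.1 then g else g.insert fp.1.1 []) := by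
        rw [contains_pvMapCount]
        by_cases hc : g.contains fp.1.1 = true
        · simp [hc]
        · simp only [eq_false_of_ne_true hc, Bool.false_eq_true, if_false]
          exact insert_pvMapCount g fp.1.1 []
      set gi := if g.contains fp.1.1 then g else g.insert fp.1.1 [] with hgi
      have h1 : gi.contains "all" = true := by
        rw [hgi]
        by_cases hc : g.contains fp.1.1 = true
        · simp [hc, hall]
        · simp only [eq_false_of_ne_true hc, Bool.false_eq_true, if_false]
          rw [PySem.Dict.contains_insert]; simp [hall]
      have h2 : gi.contains fp.1.1 = true := by
        rw [hgi]
        by_cases hc : g.contains fp.1.1 = true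
        · simp [hc]
        · simp only [eq_false_of_ne_true hc, Bool.false_eq_true, if_false]
          rw [PySem.Dict.contains_insert]; simp
      rw [hiter, modify_pvMapCount gi "all" fp.2 h1,
        modify_pvMapCount _ fp.1.1 fp.2 (contains_modify' gi "all" fp.1.1 _ h2),
        step_eq g fp.1.1 fp.2 hall]
    rw [hstep, ih _ (contains_all_stepB g fp.1.1 fp.2 hall)]

-- ===== VERDICT (by name: the statement is the Claim_ definition above) =====
theorem calculate_statistics_map_spec : Claim_equal_calculate_statistics_map := by
  intro fp_list _ _
  show calculate_statistics_map fp_list = calculate_statistics_map_alt fp_list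
  simp only [calculate_statistics_map, calculate_statistics_map_alt]
  have hinit : (PySem.Dict.ofList [("all", pvStats)] : PySem.Dict String (PySem.Dict String Int))
      = pvMapCount (PySem.Dict.ofList [("all", ([] : List String))]) := by rfl
  have hall0 : (PySem.Dict.ofList [("all", ([] : List String))]).contains "all" = true := by rfl
  rw [hinit, loop_eq fp_list _ hall0]
  simp [pvMapCount, List.map_map, Function.comp_def]
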